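-- pv_equiv track=rewrite | github.com/MayuriMore10/EDI_PROJECT_3 | backend/app/services/compare.py | get_segment_summary
-- ===== SOURCE A (Python) =====
-- from typing import Dict, Iterable, List, Tuple
--
-- def get_segment_summary(present_fields: Iterable[str], requirements: Dict[str, bool]) -> List[Dict[str, str]]:
--     """
--     Generate segment-based summary in the format shown in EDI 855 validator.
--
--     Returns:
--         List of segment dictionaries with columns: segment_tag, x12_requirement,
--         company_usage, min_usage, max_usage, present_in_edi, status
--     """
--     present = set(present_fields)
--
--     # Define EDI 810 segments with their usage patterns
--     segments = {
--         "ISA": {"x12_requirement": "mandatory", "company_usage": "must_use", "min_usage": "1", "max_usage": "1"},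
--         "GS": {"x12_requirement": "mandatory", "company_usage": "must_use", "min_usage": "1", "max_usage": "1"},
--         "ST": {"x12_requirement": "mandatory", "company_usage": "must_use", "min_usage": "1", "max_usage": "1"},
--         "BIG": {"x12_requirement": "mandatory", "company_usage": "must_use", "min_usage": "1", "max_usage": "1"},
--         "REF": {"x12_requirement": "optional", "company_usage": "used", "min_usage": "0", "max_usage": "12"},
--         "N1": {"x12_requirement": "optional", "company_usage": "used", "min_usage": "1", "max_usage": "200"},
--         "N2": {"x12_requirement": "optional", "company_usage": "used", "min_usage": "0", "max_usage": "2"},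
--         "N3": {"x12_requirement": "optional", "company_usage": "used", "min_usage": "0", "max_usage": "2"},
--         "N4": {"x12_requirement": "optional", "company_usage": "used", "min_usage": "0", "max_usage": "1"},
--         "PER": {"x12_requirement": "optional", "company_usage": "used", "min_usage": "0", "max_usage": "3"},
--         "ITD": {"x12_requirement": "optional", "company_usage": "used", "min_usage": "0", "max_usage": "10"},
--         "DTM": {"x12_requirement": "optional", "company_usage": "used", "min_usage": "0", "max_usage": "10"},
--         "FOB": {"x12_requirement": "optional", "company_usage": "used", "min_usage": "0", "max_usage": "1"},
--         "CUR": {"x12_requirement": "optional", "company_usage": "used", "min_usage": "0", "max_usage": "1"},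
--         "IT1": {"x12_requirement": "mandatory", "company_usage": "must_use", "min_usage": "1", "max_usage": "999999"},
--         "PID": {"x12_requirement": "optional", "company_usage": "used", "min_usage": "0", "max_usage": "200"},
--         "SAC": {"x12_requirement": "optional", "company_usage": "used", "min_usage": "0", "max_usage": "25"},
--         "TXI": {"x12_requirement": "optional", "company_usage": "used", "min_usage": "0", "max_usage": "10"},
--         "SLN": {"x12_requirement": "optional", "company_usage": "used", "min_usage": "0", "max_usage": "1000"},
--         "TDS": {"x12_requirement": "mandatory", "company_usage": "must_use", "min_usage": "1", "max_usage": "1"},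
--         "ISS": {"x12_requirement": "optional", "company_usage": "used", "min_usage": "0", "max_usage": "1"},
--         "CTT": {"x12_requirement": "optional", "company_usage": "used", "min_usage": "0", "max_usage": "1"},
--         "SE": {"x12_requirement": "mandatory", "company_usage": "must_use", "min_usage": "1", "max_usage": "1"},
--         "GE": {"x12_requirement": "mandatory", "company_usage": "must_use", "min_usage": "1", "max_usage": "1"},
--         "IEA": {"x12_requirement": "mandatory", "company_usage": "must_use", "min_usage": "1", "max_usage": "1"}
--     }
--
--     segment_summary = []
--
--     for segment_tag, segment_info in segments.items():
--         # Check if any fields from this segment are present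
--         segment_fields = [field for field in present if field.startswith(segment_tag)]
--         is_present = len(segment_fields) > 0
--
--         # Determine status
--         if segment_info["x12_requirement"] == "mandatory":
--             status = "✓ Present" if is_present else "✗ Missing"
--         else:
--             status = "✓ Present" if is_present else "✗ Missing"
--
--         segment_summary.append({
--             "segment_tag": segment_tag,
--             "x12_requirement": segment_info["x12_requirement"],
--             "company_usage": segment_info["company_usage"],
--             "min_usage": segment_info["min_usage"],
--             "max_usage": segment_info["max_usage"],
--             "present_in_edi": "Yes" if is_present else "No",
--             "status": status
--         })
--
--     return segment_summary
-- ===== SOURCE B (Python) =====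
-- # B: index the present fields once (2- and 3-char prefixes into the tag set),
-- # then emit rows in one pass over the fixed segment table — no nested 25xP scan.
-- _SEGMENTS = [
--     ("ISA", "mandatory", "must_use", "1", "1"),
--     ("GS", "mandatory", "must_use", "1", "1"),
--     ("ST", "mandatory", "must_use", "1", "1"),
--     ("BIG", "mandatory", "must_use", "1", "1"),
--     ("REF", "optional", "used", "0", "12"),
--     ("N1", "optional", "used", "1", "200"),
--     ("N2", "optional", "used", "0", "2"),
--     ("N3", "optional", "used", "0", "2"),
--     ("N4", "optional", "used", "0", "1"),
--     ("PER", "optional", "used", "0", "3"),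
--     ("ITD", "optional", "used", "0", "10"),
--     ("DTM", "optional", "used", "0", "10"),
--     ("FOB", "optional", "used", "0", "1"),
--     ("CUR", "optional", "used", "0", "1"),
--     ("IT1", "mandatory", "must_use", "1", "999999"),
--     ("PID", "optional", "used", "0", "200"),
--     ("SAC", "optional", "used", "0", "25"),
--     ("TXI", "optional", "used", "0", "10"),
--     ("SLN", "optional", "used", "0", "1000"),
--     ("TDS", "mandatory", "must_use", "1", "1"),
--     ("ISS", "optional", "used", "0", "1"),
--     ("CTT", "optional", "used", "0", "1"),
--     ("SE", "mandatory", "must_use", "1", "1"),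
--     ("GE", "mandatory", "must_use", "1", "1"),
--     ("IEA", "mandatory", "must_use", "1", "1"),
-- ]
-- _TAGS = {t for t, _, _, _, _ in _SEGMENTS}
--
--
-- def get_segment_summary(present_fields, requirements):
--     present_tags = set()
--     for field in present_fields:
--         if field[:2] in _TAGS:
--             present_tags.add(field[:2])
--         if field[:3] in _TAGS:
--             present_tags.add(field[:3])
--     summary = []
--     for tag, req, usage, mn, mx in _SEGMENTS:
--         is_present = tag in present_tags
--         summary.append({
--             "segment_tag": tag,
--             "x12_requirement": req,
--             "company_usage": usage,
--             "min_usage": mn,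
--             "max_usage": mx,
--             "present_in_edi": "Yes" if is_present else "No",
--             "status": "✓ Present" if is_present else "✗ Missing",
--         })
--     return summary
-- ===== Notes on version B (the rewrite author's own statement) =====
-- stated objective: faster
-- what changed: Instead of scanning the present-field set once per segment (25 startswith scans), B makes a single pass over the fields, indexing each field's 2- and 3-char prefix into the fixed tag set, then emits the rows in one pass over the segment table.
import Mathlib
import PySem

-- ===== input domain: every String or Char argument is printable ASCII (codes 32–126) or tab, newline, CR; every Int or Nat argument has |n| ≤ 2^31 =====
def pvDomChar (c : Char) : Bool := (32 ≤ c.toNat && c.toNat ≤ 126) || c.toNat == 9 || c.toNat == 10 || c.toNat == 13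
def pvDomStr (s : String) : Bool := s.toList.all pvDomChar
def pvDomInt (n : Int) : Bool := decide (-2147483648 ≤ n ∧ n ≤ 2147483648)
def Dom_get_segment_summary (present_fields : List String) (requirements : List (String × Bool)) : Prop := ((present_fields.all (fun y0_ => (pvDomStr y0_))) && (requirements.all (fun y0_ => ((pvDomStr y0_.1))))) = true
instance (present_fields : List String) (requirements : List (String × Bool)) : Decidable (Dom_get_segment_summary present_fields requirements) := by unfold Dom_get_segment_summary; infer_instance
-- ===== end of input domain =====

-- B replaces A's 25 scans of the present-field set (one `startswith` scan per segment)
-- by a single indexing pass over the fields (2-/3-char prefixes into the tag set) plus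
-- one emission pass over the fixed table; same rows in the same order.

-- ===== PORT A =====
-- the literal `segments` dict of A: tag ↦ info dict (association lists, insertion order)
def pvSegmentsA : List (String × PySem.Dict String String) := [
  ("ISA", PySem.Dict.ofList [("x12_requirement","mandatory"),("company_usage","must_use"),("min_usage","1"),("max_usage","1")]),
  ("GS", PySem.Dict.ofList [("x12_requirement","mandatory"),("company_usage","must_use"),("min_usage","1"),("max_usage","1")]),
  ("ST", PySem.Dict.ofList [("x12_requirement","mandatory"),("company_usage","must_use"),("min_usage","1"),("max_usage","1")]),
  ("BIG", PySem.Dict.ofList [("x12_requirement","mandatory"),("company_usage","must_use"),("min_usage","1"),("max_usage","1")]),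
  ("REF", PySem.Dict.ofList [("x12_requirement","optional"),("company_usage","used"),("min_usage","0"),("max_usage","12")]),
  ("N1", PySem.Dict.ofList [("x12_requirement","optional"),("company_usage","used"),("min_usage","1"),("max_usage","200")]),
  ("N2", PySem.Dict.ofList [("x12_requirement","optional"),("company_usage","used"),("min_usage","0"),("max_usage","2")]),
  ("N3", PySem.Dict.ofList [("x12_requirement","optional"),("company_usage","used"),("min_usage","0"),("max_usage","2")]),
  ("N4", PySem.Dict.ofList [("x12_requirement","optional"),("company_usage","used"),("min_usage","0"),("max_usage","1")]),
  ("PER", PySem.Dict.ofList [("x12_requirement","optional"),("company_usage","used"),("min_usage","0"),("max_usage","3")]),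
  ("ITD", PySem.Dict.ofList [("x12_requirement","optional"),("company_usage","used"),("min_usage","0"),("max_usage","10")]),
  ("DTM", PySem.Dict.ofList [("x12_requirement","optional"),("company_usage","used"),("min_usage","0"),("max_usage","10")]),
  ("FOB", PySem.Dict.ofList [("x12_requirement","optional"),("company_usage","used"),("min_usage","0"),("max_usage","1")]),
  ("CUR", PySem.Dict.ofList [("x12_requirement","optional"),("company_usage","used"),("min_usage","0"),("max_usage","1")]),
  ("IT1", PySem.Dict.ofList [("x12_requirement","mandatory"),("company_usage","must_use"),("min_usage","1"),("max_usage","999999")]),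
  ("PID", PySem.Dict.ofList [("x12_requirement","optional"),("company_usage","used"),("min_usage","0"),("max_usage","200")]),
  ("SAC", PySem.Dict.ofList [("x12_requirement","optional"),("company_usage","used"),("min_usage","0"),("max_usage","25")]),
  ("TXI", PySem.Dict.ofList [("x12_requirement","optional"),("company_usage","used"),("min_usage","0"),("max_usage","10")]),
  ("SLN", PySem.Dict.ofList [("x12_requirement","optional"),("company_usage","used"),("min_usage","0"),("max_usage","1000")]),
  ("TDS", PySem.Dict.ofList [("x12_requirement","mandatory"),("company_usage","must_use"),("min_usage","1"),("max_usage","1")]),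
  ("ISS", PySem.Dict.ofList [("x12_requirement","optional"),("company_usage","used"),("min_usage","0"),("max_usage","1")]),
  ("CTT", PySem.Dict.ofList [("x12_requirement","optional"),("company_usage","used"),("min_usage","0"),("max_usage","1")]),
  ("SE", PySem.Dict.ofList [("x12_requirement","mandatory"),("company_usage","must_use"),("min_usage","1"),("max_usage","1")]),
  ("GE", PySem.Dict.ofList [("x12_requirement","mandatory"),("company_usage","must_use"),("min_usage","1"),("max_usage","1")]),
  ("IEA", PySem.Dict.ofList [("x12_requirement","mandatory"),("company_usage","must_use"),("min_usage","1"),("max_usage","1")])]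

-- segment_info["k"]: every key is present in these literal dicts, so getD "" is exact (no KeyError reachable)
def get_segment_summary (present_fields : List String) (requirements : List (String × Bool)) : List (List (String × String)) :=
  let present := PySem.Set.ofList present_fields
  pvSegmentsA.foldl (fun segment_summary p =>
    let segment_tag := p.1
    let segment_info := p.2
    let segment_fields := present.filter (fun field => PySem.Str.startswith field segment_tag)
    let is_present := decide (segment_fields.length > 0)
    let status :=
      if PySem.Dict.getD segment_info "x12_requirement" "" = "mandatory" then
        (if is_present then "✓ Present" else "✗ Missing")
      else
        (if is_present then "✓ Present" else "✗ Missing")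
    segment_summary ++ [[
      ("segment_tag", segment_tag),
      ("x12_requirement", PySem.Dict.getD segment_info "x12_requirement" ""),
      ("company_usage", PySem.Dict.getD segment_info "company_usage" ""),
      ("min_usage", PySem.Dict.getD segment_info "min_usage" ""),
      ("max_usage", PySem.Dict.getD segment_info "max_usage" ""),
      ("present_in_edi", if is_present then "Yes" else "No"),
      ("status", status)]]) []

-- ===== PORT B =====
-- _SEGMENTS: (tag, x12_requirement, company_usage, min_usage, max_usage)
def pvSegTable : List (String × String × String × String × String) := [
  ("ISA","mandatory","must_use","1","1"), ("GS","mandatory","must_use","1","1"),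
  ("ST","mandatory","must_use","1","1"), ("BIG","mandatory","must_use","1","1"),
  ("REF","optional","used","0","12"), ("N1","optional","used","1","200"),
  ("N2","optional","used","0","2"), ("N3","optional","used","0","2"),
  ("N4","optional","used","0","1"), ("PER","optional","used","0","3"),
  ("ITD","optional","used","0","10"), ("DTM","optional","used","0","10"),
  ("FOB","optional","used","0","1"), ("CUR","optional","used","0","1"),
  ("IT1","mandatory","must_use","1","999999"), ("PID","optional","used","0","200"),
  ("SAC","optional","used","0","25"), ("TXI","optional","used","0","10"),
  ("SLN","optional","used","0","1000"), ("TDS","mandatory","must_use","1","1"),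
  ("ISS","optional","used","0","1"), ("CTT","optional","used","0","1"),
  ("SE","mandatory","must_use","1","1"), ("GE","mandatory","must_use","1","1"),
  ("IEA","mandatory","must_use","1","1")]

-- _TAGS = {t for t, ... in _SEGMENTS}
def pvTags : PySem.Set String := PySem.Set.ofList (pvSegTable.map (fun q => q.1))

-- the body of Source B's indexing loop: one lookup/add pair per prefix length
def pvMarkOne (present_tags : PySem.Set String) (p : String) : PySem.Set String :=
  if PySem.Set.contains pvTags p then PySem.Set.add present_tags p else present_tags

def pvMark (present_tags : PySem.Set String) (field : String) : PySem.Set String :=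
  pvMarkOne (pvMarkOne present_tags (PySem.Str.slice field none (some 2)))
    (PySem.Str.slice field none (some 3))

def pvPresentTags (present_fields : List String) : PySem.Set String :=
  present_fields.foldl pvMark PySem.Set.empty

def get_segment_summary_alt (present_fields : List String) (requirements : List (String × Bool)) : List (List (String × String)) :=
  let present_tags := pvPresentTags present_fields
  pvSegTable.map (fun q =>
    let is_present := PySem.Set.contains present_tags q.1
    [("segment_tag", q.1),
     ("x12_requirement", q.2.1),
     ("company_usage", q.2.2.1),
     ("min_usage", q.2.2.2.1),
     ("max_usage", q.2.2.2.2),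
     ("present_in_edi", if is_present then "Yes" else "No"),
     ("status", if is_present then "✓ Present" else "✗ Missing")])

-- ===== PRECONDITION & SPEC =====
def Spec_get_segment_summary (present_fields : List String) (requirements : List (String × Bool)) (out : List (List (String × String))) : Prop := out = get_segment_summary_alt present_fields requirements
instance (present_fields : List String) (requirements : List (String × Bool)) (out : List (List (String × String))) : Decidable (Spec_get_segment_summary present_fields requirements out) := by unfold Spec_get_segment_summary; infer_instance

-- ===== CLAIM (what is proved, stated in full; the proofs are below) =====
def Claim_equal_get_segment_summary : Prop := ∀ (present_fields : List String) (requirements : List (String × Bool)), Dom_get_segment_summary present_fields requirements → Spec_get_segment_summary present_fields requirements (get_segment_summary present_fields requirements)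

-- ===== LEMMAS AND PROOFS =====

-- the common presence test: some present field starts with the tag
def pvIsP (pf : List String) (t : String) : Bool := pf.any (fun f => PySem.Str.startswith f t)

-- the common row shape
def pvRow (b : Bool) (q : String × String × String × String × String) : List (String × String) :=
  [("segment_tag", q.1), ("x12_requirement", q.2.1), ("company_usage", q.2.2.1),
   ("min_usage", q.2.2.2.1), ("max_usage", q.2.2.2.2),
   ("present_in_edi", if b then "Yes" else "No"),
   ("status", if b then "✓ Present" else "✗ Missing")]

lemma pvA_present (pf : List String) (t : String) :
    decide (0 < ((PySem.Set.ofList pf).filter (fun f => PySem.Str.startswith f t)).length) = pvIsP pf t := by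
  have h : (0 < ((PySem.Set.ofList pf).filter (fun f => PySem.Str.startswith f t)).length) ↔ pvIsP pf t = true := by
    simp [pvIsP, List.length_pos_iff, List.eq_nil_iff_forall_not_mem, List.mem_filter,
      PySem.Set.mem_ofList, List.any_eq_true]
  rw [show pvIsP pf t = decide (pvIsP pf t = true) by simp, decide_eq_decide]
  exact h

lemma pvMarkOne_mem (s : PySem.Set String) (p t : String) :
    t ∈ pvMarkOne s p ↔ t ∈ s ∨ (p = t ∧ PySem.Set.contains pvTags t = true) := by
  unfold pvMarkOne
  split_ifs with h
  · simp only [PySem.Set.mem_add]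
    constructor
    · rintro (hs | rfl)
      · exact Or.inl hs
      · exact Or.inr ⟨rfl, h⟩
    · rintro (hs | ⟨rfl, _⟩)
      · exact Or.inl hs
      · exact Or.inr rfl
  · constructor
    · exact Or.inl
    · rintro (hs | ⟨rfl, hc⟩)
      · exact hs
      · exact absurd hc h

lemma pvMark_mem (s : PySem.Set String) (f t : String) :
    t ∈ pvMark s f ↔ t ∈ s ∨
      ((PySem.Str.slice f none (some 2) = t ∨ PySem.Str.slice f none (some 3) = t) ∧
        PySem.Set.contains pvTags t = true) := by
  unfold pvMark
  rw [pvMarkOne_mem, pvMarkOne_mem]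
  tauto

lemma pvPresentTags_mem (pf : List String) (t : String) :
    t ∈ pvPresentTags pf ↔ ∃ f ∈ pf,
      (PySem.Str.slice f none (some 2) = t ∨ PySem.Str.slice f none (some 3) = t) ∧
        PySem.Set.contains pvTags t = true := by
  have gen : ∀ (l : List String) (acc : PySem.Set String),
      t ∈ l.foldl pvMark acc ↔ t ∈ acc ∨ ∃ f ∈ l,
        (PySem.Str.slice f none (some 2) = t ∨ PySem.Str.slice f none (some 3) = t) ∧
          PySem.Set.contains pvTags t = true := by
    intro l
    induction l with
    | nil => simp
    | cons x xs ih =>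
      intro acc
      simp only [List.foldl_cons, ih, pvMark_mem, List.mem_cons]
      constructor
      · rintro ((h | h) | ⟨f, hf, h⟩)
        · exact Or.inl h
        · exact Or.inr ⟨x, Or.inl rfl, h⟩
        · exact Or.inr ⟨f, Or.inr hf, h⟩
      · rintro (h | ⟨f, (rfl | hf), h⟩)
        · exact Or.inl (Or.inl h)
        · exact Or.inl (Or.inr h)
        · exact Or.inr ⟨f, hf, h⟩
  unfold pvPresentTags
  rw [gen]
  simp [PySem.Set.empty]

lemma pvSlice2 (f : String) : (PySem.Str.slice f none (some 2)).toList = f.toList.take 2 := by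
  simp [PySem.Chars.slice_eq_listSlice]
  exact PySem.List.slice_to_natCast f.toList 2

lemma pvSlice3 (f : String) : (PySem.Str.slice f none (some 3)).toList = f.toList.take 3 := by
  simp [PySem.Chars.slice_eq_listSlice]
  exact PySem.List.slice_to_natCast f.toList 3

-- prefix test via slices, for a 2-char tag
lemma pvTag2 (t : String) (hl : t.toList.length = 2) (f : String) :
    (PySem.Str.slice f none (some 2) = t ∨ PySem.Str.slice f none (some 3) = t) ↔
      PySem.Str.startswith f t = true := by
  have e2 : (PySem.Str.slice f none (some 2) = t) ↔ f.toList.take 2 = t.toList := by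
    rw [← String.toList_inj, pvSlice2 f]
  have e3 : (PySem.Str.slice f none (some 3) = t) ↔ f.toList.take 3 = t.toList := by
    rw [← String.toList_inj, pvSlice3 f]
  rw [e2, e3, show (PySem.Str.startswith f t = true) ↔ t.toList <+: f.toList by
    simp [PySem.Chars.startswith_iff]]
  constructor
  · rintro (h | h)
    · rw [List.prefix_iff_eq_take, hl, h]
    · have hlen : f.toList.length = 2 := by
        have := congrArg List.length h
        simp only [List.length_take, hl] at this
        omega
      have hf : f.toList.take 3 = f.toList := List.take_of_length_le (by omega)
      rw [List.prefix_iff_eq_take, hl, List.take_of_length_le (by omega), ← h, hf]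
  · intro h
    left
    rw [List.prefix_iff_eq_take, hl] at h
    exact h.symm

-- and for a 3-char tag
lemma pvTag3 (t : String) (hl : t.toList.length = 3) (f : String) :
    (PySem.Str.slice f none (some 2) = t ∨ PySem.Str.slice f none (some 3) = t) ↔
      PySem.Str.startswith f t = true := by
  have e2 : (PySem.Str.slice f none (some 2) = t) ↔ f.toList.take 2 = t.toList := by
    rw [← String.toList_inj, pvSlice2 f]
  have e3 : (PySem.Str.slice f none (some 3) = t) ↔ f.toList.take 3 = t.toList := by
    rw [← String.toList_inj, pvSlice3 f]
  rw [e2, e3, show (PySem.Str.startswith f t = true) ↔ t.toList <+: f.toList by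
    simp [PySem.Chars.startswith_iff]]
  constructor
  · rintro (h | h)
    · exfalso
      have := congrArg List.length h
      simp only [List.length_take, hl] at this
      omega
    · rw [List.prefix_iff_eq_take, hl]
      exact h.symm
  · intro h
    right
    rw [List.prefix_iff_eq_take, hl] at h
    exact h.symm

lemma pvB2 (t : String) (hc : PySem.Set.contains pvTags t = true) (hl : t.toList.length = 2)
    (pf : List String) : PySem.Set.contains (pvPresentTags pf) t = pvIsP pf t := by
  rw [show pvIsP pf t = decide (pvIsP pf t = true) by simp,
    show PySem.Set.contains (pvPresentTags pf) t
      = decide (PySem.Set.contains (pvPresentTags pf) t = true) by simp, decide_eq_decide]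
  rw [PySem.Set.contains_iff, pvPresentTags_mem]
  simp only [pvIsP, List.any_eq_true, pvTag2 t hl, hc, and_true]

lemma pvB3 (t : String) (hc : PySem.Set.contains pvTags t = true) (hl : t.toList.length = 3)
    (pf : List String) : PySem.Set.contains (pvPresentTags pf) t = pvIsP pf t := by
  rw [show pvIsP pf t = decide (pvIsP pf t = true) by simp,
    show PySem.Set.contains (pvPresentTags pf) t
      = decide (PySem.Set.contains (pvPresentTags pf) t = true) by simp, decide_eq_decide]
  rw [PySem.Set.contains_iff, pvPresentTags_mem]
  simp only [pvIsP, List.any_eq_true, pvTag3 t hl, hc, and_true]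

lemma pvAltEq (pf : List String) (req : List (String × Bool)) :
    get_segment_summary_alt pf req = pvSegTable.map (fun q => pvRow (pvIsP pf q.1) q) := by
  simp only [get_segment_summary_alt, pvSegTable, List.map, pvRow,
    pvB2 "GS" (by decide) (by decide), pvB2 "ST" (by decide) (by decide),
    pvB2 "N1" (by decide) (by decide), pvB2 "N2" (by decide) (by decide),
    pvB2 "N3" (by decide) (by decide), pvB2 "N4" (by decide) (by decide),
    pvB2 "SE" (by decide) (by decide), pvB2 "GE" (by decide) (by decide),
    pvB3 "ISA" (by decide) (by decide), pvB3 "BIG" (by decide) (by decide),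
    pvB3 "REF" (by decide) (by decide), pvB3 "PER" (by decide) (by decide),
    pvB3 "ITD" (by decide) (by decide), pvB3 "DTM" (by decide) (by decide),
    pvB3 "FOB" (by decide) (by decide), pvB3 "CUR" (by decide) (by decide),
    pvB3 "IT1" (by decide) (by decide), pvB3 "PID" (by decide) (by decide),
    pvB3 "SAC" (by decide) (by decide), pvB3 "TXI" (by decide) (by decide),
    pvB3 "SLN" (by decide) (by decide), pvB3 "TDS" (by decide) (by decide),
    pvB3 "ISS" (by decide) (by decide), pvB3 "CTT" (by decide) (by decide),
    pvB3 "IEA" (by decide) (by decide)]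

lemma pvAEq (pf : List String) (req : List (String × Bool)) :
    get_segment_summary pf req = pvSegTable.map (fun q => pvRow (pvIsP pf q.1) q) := by
  simp only [get_segment_summary, pvSegmentsA, List.foldl, pvA_present]
  simp [pvSegTable, pvRow, PySem.Dict.getD]
  decide

-- ===== VERDICT (by name: the statement is the Claim_ definition above) =====
theorem get_segment_summary_spec : Claim_equal_get_segment_summary := by
  intro pf req _
  unfold Spec_get_segment_summary
  rw [pvAEq, pvAltEq]
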